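-- pv_equiv track=rewrite | github.com/Galaxy-0/dify-docs | build_bid_doc.py | slice_between
-- ===== SOURCE A (Python) =====
-- from typing import Optional
--
-- def slice_between(text: str, start_heading: str, end_heading: Optional[str]) -> str:
--     lines = text.splitlines()
--     start_idx = None
--     for idx, line in enumerate(lines):
--         if line.strip() == start_heading.strip():
--             start_idx = idx
--             break
--     if start_idx is None:
--         return ''
--     end_idx = len(lines)
--     if end_heading:
--         for idx in range(start_idx + 1, len(lines)):
--             if lines[idx].strip() == end_heading.strip():
--                 end_idx = idx
--                 break
--     return '\n'.join(lines[start_idx:end_idx]).strip()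
-- ===== SOURCE B (Python) =====
-- from typing import Optional
--
-- def slice_between(text: str, start_heading: str, end_heading: Optional[str]) -> str:
--     target = start_heading.strip()
--     end_target = end_heading.strip() if end_heading else None
--     buf = []
--     collecting = False
--     for line in text.splitlines():
--         if not collecting:
--             if line.strip() == target:
--                 collecting = True
--                 buf.append(line)
--         else:
--             if end_target is not None and line.strip() == end_target:
--                 break
--             buf.append(line)
--     return '\n'.join(buf).strip()
-- ===== Notes on version B (the rewrite author's own statement) =====
-- stated objective: alternative
-- what changed: Replaces the find-start-index / find-end-index / slice structure with a single pass over the lines using a collecting flag and a buffer, joining the buffer at the end.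
import Mathlib
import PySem

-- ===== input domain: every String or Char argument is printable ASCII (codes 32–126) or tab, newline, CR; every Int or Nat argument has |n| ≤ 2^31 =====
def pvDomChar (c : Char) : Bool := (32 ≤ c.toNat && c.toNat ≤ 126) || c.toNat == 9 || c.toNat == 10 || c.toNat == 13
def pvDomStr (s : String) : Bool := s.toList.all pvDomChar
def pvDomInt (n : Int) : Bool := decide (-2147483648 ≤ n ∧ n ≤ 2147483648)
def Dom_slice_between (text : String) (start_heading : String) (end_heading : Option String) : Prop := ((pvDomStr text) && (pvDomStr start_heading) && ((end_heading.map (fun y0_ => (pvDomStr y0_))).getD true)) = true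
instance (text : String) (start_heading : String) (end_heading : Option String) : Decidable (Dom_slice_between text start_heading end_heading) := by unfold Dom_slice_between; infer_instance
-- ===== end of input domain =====

-- B replaces A's find-start-index / find-end-index / slice structure by a single pass
-- with a collecting flag and a buffer (objective: alternative decomposition, same cost).


-- ===== PORT A =====
-- 'for idx, line in enumerate(lines): if line.strip() == start_heading.strip(): start_idx = idx; break'
def pvFindStart (target : String) : List String → Nat → Option Nat
  | [], _ => none
  | l :: ls, i => if PySem.Str.strip l = target then some i else pvFindStart target ls (i + 1)

-- 'for idx in range(start_idx + 1, len(lines)): if lines[idx].strip() == end_heading.strip(): end_idx = idx; break' (else end_idx = len(lines))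
def pvFindEnd (target : String) (lines : List String) (i : Nat) : Nat :=
  if h : i < lines.length then
    if PySem.Str.strip lines[i] = target then i else pvFindEnd target lines (i + 1)
  else lines.length
  termination_by lines.length - i

def slice_between (text : String) (start_heading : String) (end_heading : Option String) : String :=
  let lines := PySem.Str.splitlines text
  match pvFindStart (PySem.Str.strip start_heading) lines 0 with
  | none => ""
  | some start_idx =>
    let end_idx : Nat :=
      match end_heading with
      | some e => if e ≠ "" then pvFindEnd (PySem.Str.strip e) lines (start_idx + 1) else lines.length
      | none => lines.length
    PySem.Str.strip (PySem.Str.join "\n" (PySem.List.slice lines (some (start_idx : Int)) (some (end_idx : Int))))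

-- ===== PORT B =====
-- the 'collecting' phase of the loop: take lines until the end target (if any) is seen
def pvTake (endT : Option String) : List String → List String
  | [] => []
  | l :: ls =>
    match endT with
    | some e => if PySem.Str.strip l = e then [] else l :: pvTake endT ls
    | none => l :: pvTake endT ls

-- the 'not collecting' phase: scan for the start target, then switch to pvTake
def pvCollect (target : String) (endT : Option String) : List String → List String
  | [] => []
  | l :: ls => if PySem.Str.strip l = target then l :: pvTake endT ls else pvCollect target endT ls

def slice_between_alt (text : String) (start_heading : String) (end_heading : Option String) : String :=
  let endT : Option String :=
    match end_heading with
    | some e => if e ≠ "" then some (PySem.Str.strip e) else none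
    | none => none
  PySem.Str.strip (PySem.Str.join "\n"
    (pvCollect (PySem.Str.strip start_heading) endT (PySem.Str.splitlines text)))

-- ===== PRECONDITION & SPEC =====
def Spec_slice_between (text : String) (start_heading : String) (end_heading : Option String) (out : String) : Prop := out = slice_between_alt text start_heading end_heading
instance (text : String) (start_heading : String) (end_heading : Option String) (out : String) : Decidable (Spec_slice_between text start_heading end_heading out) := by unfold Spec_slice_between; infer_instance

-- ===== CLAIM (what is proved, stated in full; the proofs are below) =====
def Claim_equal_slice_between : Prop := ∀ (text : String) (start_heading : String) (end_heading : Option String), Dom_slice_between text start_heading end_heading → Spec_slice_between text start_heading end_heading (slice_between text start_heading end_heading)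

-- ===== LEMMAS AND PROOFS =====

theorem pvFindStart_shift (t : String) (ls : List String) (i : Nat) :
    pvFindStart t ls i = (pvFindStart t ls 0).map (· + i) := by
  induction ls generalizing i with
  | nil => simp [pvFindStart]
  | cons l ls ih =>
    by_cases h : PySem.Str.strip l = t
    · simp [pvFindStart, h]
    · simp only [pvFindStart, if_neg h]
      rw [ih (i + 1), ih 1, Option.map_map]
      congr 1
      funext x
      simp [Nat.add_comm, Nat.add_left_comm]

theorem pvFindEnd_succ (e l : String) (ls : List String) (i : Nat) :
    pvFindEnd e (l :: ls) (i + 1) = pvFindEnd e ls i + 1 := by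
  fun_induction pvFindEnd e ls i with
  | case1 i h hs =>
    rw [pvFindEnd]
    simp only [List.length_cons]
    rw [dif_pos (by omega)]
    have : (l :: ls)[i + 1]'(by simpa using Nat.succ_lt_succ h) = ls[i] := by simp
    rw [this, if_pos hs]
  | case2 i h hs ih =>
    rw [pvFindEnd]
    simp only [List.length_cons]
    rw [dif_pos (by omega)]
    have : (l :: ls)[i + 1]'(by simpa using Nat.succ_lt_succ h) = ls[i] := by simp
    rw [this, if_neg hs, ih]
  | case3 i h =>
    rw [pvFindEnd]
    simp only [List.length_cons]
    rw [dif_neg (by omega)]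

theorem pvTake_none (ls : List String) : pvTake none ls = ls := by
  induction ls with
  | nil => rfl
  | cons l ls ih => simp [pvTake, ih]

theorem pvTake_some (e : String) (ls : List String) :
    pvTake (some e) ls = ls.take (pvFindEnd e ls 0) := by
  induction ls with
  | nil => rw [pvFindEnd]; simp [pvTake]
  | cons l ls ih =>
    by_cases h : PySem.Str.strip l = e
    · rw [pvTake]
      simp only [if_pos h]
      rw [pvFindEnd]
      rw [dif_pos (by simp)]
      simp [h]
    · rw [pvTake]
      simp only [if_neg h]
      rw [pvFindEnd, dif_pos (by simp)]
      simp only [List.getElem_cons_zero, if_neg h]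
      rw [show (0 + 1 : Nat) = 0 + 1 from rfl, pvFindEnd_succ, ih]
      simp

-- end index as A computes it, after normalising the end heading to an Option
def pvEndIdx (endT : Option String) (lines : List String) (si : Nat) : Nat :=
  match endT with
  | some e => pvFindEnd e lines (si + 1)
  | none => lines.length

theorem pvMain (t : String) (endT : Option String) (lines : List String) :
    (match pvFindStart t lines 0 with
     | none => ([] : List String)
     | some si => (lines.drop si).take (pvEndIdx endT lines si - si)) =
    pvCollect t endT lines := by
  induction lines with
  | nil => rfl
  | cons l ls ih =>
    by_cases h : PySem.Str.strip l = t
    · simp only [pvFindStart, if_pos h, pvCollect]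
      match endT with
      | none =>
        simp [pvEndIdx, pvTake_none, List.take_of_length_le]
      | some e =>
        simp only [pvEndIdx]
        rw [show (0 + 1 : Nat) = 0 + 1 from rfl, pvFindEnd_succ, pvTake_some]
        simp
    · simp only [pvFindStart, if_neg h, pvCollect]
      rw [pvFindStart_shift t ls 1, ← ih]
      cases hf : pvFindStart t ls 0 with
      | none => simp
      | some si =>
        simp only [Option.map_some]
        have hdrop : (l :: ls).drop (si + 1) = ls.drop si := by simp
        rw [hdrop]
        congr 1
        match endT with
        | none => simp [pvEndIdx]
        | some e =>
          simp only [pvEndIdx]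
          rw [pvFindEnd_succ]
          omega

-- ===== VERDICT (by name: the statement is the Claim_ definition above) =====
theorem slice_between_spec : Claim_equal_slice_between := by
  intro text start_heading end_heading _
  unfold Spec_slice_between slice_between slice_between_alt
  set lines := PySem.Str.splitlines text with hl
  set t := PySem.Str.strip start_heading with ht
  have key := fun endT => pvMain t endT lines
  cases hf : pvFindStart t lines 0 with
  | none =>
    have h1 : ∀ endT, pvCollect t endT lines = [] := by
      intro endT; rw [← key endT, hf]
    simp only [hf, h1]
    decide
  | some si =>
    have h2 : ∀ endT, pvCollect t endT lines = (lines.drop si).take (pvEndIdx endT lines si - si) := by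
      intro endT; rw [← key endT, hf]
    have hs : ∀ ei : Nat, PySem.List.slice lines (some (si : Int)) (some (ei : Int)) =
        (lines.drop si).take (ei - si) := fun ei => PySem.List.slice_natCast lines si ei
    simp only [hf]
    match end_heading with
    | none =>
      rw [h2 none, hs]
      simp [pvEndIdx]
    | some e =>
      by_cases he : e = ""
      · subst he
        simp only [ne_eq, not_true_eq_false, if_false]
        rw [h2 none, hs]
        simp [pvEndIdx]
      · simp only [ne_eq, he, not_false_eq_true, if_true]
        rw [h2 (some (PySem.Str.strip e)), hs]
        simp [pvEndIdx]
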